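-- pv_equiv track=rewrite | github.com/Boza-Analytics/Meta-Ads-Changelog-export-into-Google-Sheet | main.py | process_ad_activities
-- ===== SOURCE A (Python) =====
-- def process_ad_activities(ad_activities):
--     data_to_write = []
--     headers = ['Actor ID', 'Actor Name', 'Application ID', 'Application Name', 'Date/Time in Timezone', 'Event Time', 'Event Type', 'Extra Data', 'Object ID', 'Object Name', 'Object Type', 'Translated Event Type']
--     data_to_write.append(headers)
--
--     for activity in ad_activities:
--         row = [
--             activity.get('actor_id'),
--             activity.get('actor_name'),
--             activity.get('application_id'),
--             activity.get('application_name'),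
--             activity.get('date_time_in_timezone'),
--             activity.get('event_time'),
--             activity.get('event_type'),
--             activity.get('extra_data'),
--             activity.get('object_id'),
--             activity.get('object_name'),
--             activity.get('object_type'),
--             activity.get('translated_event_type')
--         ]
--         data_to_write.append(row)
--
--     return data_to_write
-- ===== SOURCE B (Python) =====
-- _KEYS = ['actor_id', 'actor_name', 'application_id', 'application_name',
--          'date_time_in_timezone', 'event_time', 'event_type', 'extra_data',
--          'object_id', 'object_name', 'object_type', 'translated_event_type']
--
-- def process_ad_activities(ad_activities):
--     headers = ['Actor ID', 'Actor Name', 'Application ID', 'Application Name',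
--                'Date/Time in Timezone', 'Event Time', 'Event Type', 'Extra Data',
--                'Object ID', 'Object Name', 'Object Type', 'Translated Event Type']
--     # column-major: one column per field, then transpose columns into rows
--     columns = [[activity.get(k) for activity in ad_activities] for k in _KEYS]
--     return [headers] + [list(row) for row in zip(*columns)]
-- ===== Notes on version B (the rewrite author's own statement) =====
-- stated objective: alternative
-- what changed: A accumulates rows in one row-major pass with twelve explicit .get calls per activity; B builds twelve field columns (one scan of the activities per key) and transposes them with zip(*columns), prepending the header row.
import Mathlib
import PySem

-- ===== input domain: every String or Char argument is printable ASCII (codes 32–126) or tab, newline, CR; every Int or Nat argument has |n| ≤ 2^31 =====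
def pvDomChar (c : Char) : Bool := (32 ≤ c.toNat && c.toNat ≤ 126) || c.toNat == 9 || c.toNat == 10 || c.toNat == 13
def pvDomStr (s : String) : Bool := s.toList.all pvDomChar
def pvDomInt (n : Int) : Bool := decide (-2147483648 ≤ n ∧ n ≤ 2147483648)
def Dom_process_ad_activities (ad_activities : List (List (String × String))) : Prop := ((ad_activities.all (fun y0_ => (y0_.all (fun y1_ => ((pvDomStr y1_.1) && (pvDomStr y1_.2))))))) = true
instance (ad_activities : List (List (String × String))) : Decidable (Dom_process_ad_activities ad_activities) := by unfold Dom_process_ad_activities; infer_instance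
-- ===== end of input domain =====

-- B builds twelve field columns and transposes them with zip(*columns), instead of A's
-- row-major accumulator loop with twelve explicit .get calls (objective: alternative).

-- ===== PORT A =====
def pvHeaders : List (Option String) :=
  [some "Actor ID", some "Actor Name", some "Application ID", some "Application Name",
   some "Date/Time in Timezone", some "Event Time", some "Event Type", some "Extra Data",
   some "Object ID", some "Object Name", some "Object Type", some "Translated Event Type"]

def process_ad_activities (ad_activities : List (List (String × String))) : List (List (Option String)) :=
  -- data_to_write = [headers]; for activity in …: data_to_write.append(row)
  ad_activities.foldl
    (fun data_to_write activity =>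
      let d := PySem.Dict.mk activity
      data_to_write ++
        [[d.get? "actor_id", d.get? "actor_name", d.get? "application_id", d.get? "application_name",
          d.get? "date_time_in_timezone", d.get? "event_time", d.get? "event_type", d.get? "extra_data",
          d.get? "object_id", d.get? "object_name", d.get? "object_type", d.get? "translated_event_type"]])
    [pvHeaders]

-- ===== PORT B =====
def pvKeys : List String :=
  ["actor_id", "actor_name", "application_id", "application_name",
   "date_time_in_timezone", "event_time", "event_type", "extra_data",
   "object_id", "object_name", "object_type", "translated_event_type"]

-- zip(*(c0 :: rest)): pull one element from each column per step, stop when any is exhausted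
def pvZipAux {α : Type} : List α → List (List α) → List (List α)
  | [], _ => []
  | x :: t, rest =>
    match rest.mapM List.head? with
    | none => []
    | some hs => (x :: hs) :: pvZipAux t (rest.map List.tail)

def pvZipStar {α : Type} (cols : List (List α)) : List (List α) :=
  match cols with
  | [] => []
  | c :: rest => pvZipAux c rest

def process_ad_activities_alt (ad_activities : List (List (String × String))) : List (List (Option String)) :=
  let columns := pvKeys.map (fun k => ad_activities.map (fun activity => (PySem.Dict.mk activity).get? k))
  pvHeaders :: pvZipStar columns

-- ===== PRECONDITION & SPEC =====
def Spec_process_ad_activities (ad_activities : List (List (String × String))) (out : List (List (Option String))) : Prop := out = process_ad_activities_alt ad_activities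
instance (ad_activities : List (List (String × String))) (out : List (List (Option String))) : Decidable (Spec_process_ad_activities ad_activities out) := by unfold Spec_process_ad_activities; infer_instance

-- ===== CLAIM (what is proved, stated in full; the proofs are below) =====
def Claim_equal_process_ad_activities : Prop := ∀ (ad_activities : List (List (String × String))), Dom_process_ad_activities ad_activities → Spec_process_ad_activities ad_activities (process_ad_activities ad_activities)

-- ===== LEMMAS AND PROOFS =====
theorem pv_mapM_head {β α : Type} (ks : List β) (g : β → α) (h : β → List α) :
    (ks.map (fun k => g k :: h k)).mapM List.head? = some (ks.map g) := by
  induction ks with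
  | nil => rfl
  | cons k t ih => simp [List.mapM_cons, ih]

theorem pv_zip_cols {α β γ : Type} (f : β → γ → α) (k0 : β) (ks : List β) (xs : List γ) :
    pvZipAux (xs.map (f k0)) (ks.map (fun k => xs.map (f k)))
      = xs.map (fun a => f k0 a :: ks.map (fun k => f k a)) := by
  induction xs generalizing k0 with
  | nil => simp [pvZipAux]
  | cons a t ih =>
    have hrest : (ks.map (fun k => (a :: t).map (f k)))
        = ks.map (fun k => f k a :: t.map (f k)) := by simp
    simp only [List.map_cons, pvZipAux, pv_mapM_head ks (fun k => f k a) (fun k => t.map (f k))]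
    have htail : (ks.map (fun k => f k a :: t.map (f k))).map List.tail
        = ks.map (fun k => t.map (f k)) := by simp [List.map_map]
    simp [htail, ih]

theorem pa_foldl_eq (xs : List (List (String × String))) (acc : List (List (Option String))) :
    xs.foldl
      (fun data_to_write activity =>
        let d := PySem.Dict.mk activity
        data_to_write ++
          [[d.get? "actor_id", d.get? "actor_name", d.get? "application_id", d.get? "application_name",
            d.get? "date_time_in_timezone", d.get? "event_time", d.get? "event_type", d.get? "extra_data",
            d.get? "object_id", d.get? "object_name", d.get? "object_type", d.get? "translated_event_type"]])
      acc
    = acc ++ xs.map (fun activity => pvKeys.map (fun k => (PySem.Dict.mk activity).get? k)) := by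
  induction xs generalizing acc with
  | nil => simp
  | cons a t ih => simp [ih, pvKeys]

-- ===== VERDICT (by name: the statement is the Claim_ definition above) =====
theorem process_ad_activities_spec : Claim_equal_process_ad_activities := by
  intro xs _
  unfold Spec_process_ad_activities process_ad_activities process_ad_activities_alt
  rw [pa_foldl_eq]
  have h := pv_zip_cols (fun k activity => (PySem.Dict.mk activity).get? k) "actor_id"
    ["actor_name", "application_id", "application_name",
     "date_time_in_timezone", "event_time", "event_type", "extra_data",
     "object_id", "object_name", "object_type", "translated_event_type"] xs
  simp only [List.map_cons, List.map_nil] at h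
  simp [pvZipStar, pvKeys, h]
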